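-- pv_equiv track=rewrite | github.com/azzarelli/MEng-Dissertation | lw_module.py | C_inaction
-- ===== SOURCE A (Python) =====
-- def C_inaction(choice_set):
--     weights = []
--     sum_dc = sum(choice_set.values()) # sum of all choice detriments
--     for d in choice_set:
--         weights.append((2*choice_set[d]) - sum_dc) # equation for determining weights due to inaction W = 2Dc_n - Sum(all Dc)
--                                             # looking for the largest negative weight, as it provides the largest detriment associated with all other possible choices
--     ideal_pos = 0 # position of best weight in weights array
--     other_vals = [] # if there are other choices with same weight
--     for  i in range(len(weights)):
--         if weights[i] < weights[ideal_pos]: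
--             ideal_pos = i
--             other_vals = [] # reset other positions when a new ideal weight is found
--         if weights[i] == weights[ideal_pos]: other_vals.append(i) # append equal detriment choices
--     choice_list = list(choice_set) # concatinate for array callable by index (other_pos)
--     choices = []
--     for ov in other_vals:
--         choices.append(choice_list[ov])
--     return choices
-- ===== SOURCE B (Python) =====
-- def C_inaction(choice_set):
--     # The inaction weight 2*Dc - sum(Dc) is strictly increasing in Dc, so the
--     # largest-negative weight belongs exactly to the minimal detriment values.
--     if not choice_set:
--         return []
--     m = min(choice_set.values())
--     return [k for k, v in choice_set.items() if v == m]
-- ===== Notes on version B (the rewrite author's own statement) =====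
-- stated objective: simpler
-- what changed: B drops the weights array and the ideal_pos/other_vals index bookkeeping: since the weight 2*Dc - sum is strictly increasing in Dc, B just takes m = min(choice_set.values()) and returns the keys whose value equals m, in dict order.
import Mathlib
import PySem

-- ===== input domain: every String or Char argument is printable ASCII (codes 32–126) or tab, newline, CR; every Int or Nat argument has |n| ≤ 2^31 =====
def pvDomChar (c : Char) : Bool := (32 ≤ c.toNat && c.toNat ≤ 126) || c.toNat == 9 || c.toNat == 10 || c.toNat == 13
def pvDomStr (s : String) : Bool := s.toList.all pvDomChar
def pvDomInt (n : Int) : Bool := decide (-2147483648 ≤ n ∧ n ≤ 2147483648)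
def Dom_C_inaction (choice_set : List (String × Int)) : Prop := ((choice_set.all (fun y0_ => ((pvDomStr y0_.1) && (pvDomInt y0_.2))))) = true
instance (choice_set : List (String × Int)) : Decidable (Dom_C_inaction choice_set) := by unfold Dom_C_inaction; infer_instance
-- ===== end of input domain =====

-- B replaces A's weights array and ideal_pos/other_vals index bookkeeping by
-- "keys whose value equals the minimum value" (the weight 2*Dc - sum is
-- strictly increasing in Dc); objective: simpler.

-- ===== PORT A =====
-- one step of A's second loop over i in range(len(weights))
def pvStepA (weights : List Int) (st : Nat × List Nat) (i : Nat) : Nat × List Nat :=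
  -- weights[i] with i drawn from range(len(weights)) is always in range, so getD is exact here
  let st1 := if weights.getD i 0 < weights.getD st.1 0 then (i, ([] : List Nat)) else st
  if weights.getD i 0 = weights.getD st1.1 0 then (st1.1, st1.2 ++ [i]) else st1

def C_inaction (choice_set : List (String × Int)) : List String :=
  let sum_dc : Int := (choice_set.map Prod.snd).sum
  -- for d in choice_set: weights.append(2*choice_set[d] - sum_dc)
  let weights : List Int := choice_set.foldl
    (fun ws d => ws ++ [2 * (PySem.Dict.mk choice_set).getD d.1 0 - sum_dc]) []
  let st := (List.range weights.length).foldl (pvStepA weights) (0, [])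
  let choice_list := choice_set.map Prod.fst
  st.2.foldl (fun cs ov => cs ++ [choice_list.getD ov ""]) []

-- ===== PORT B =====
def C_inaction_alt (choice_set : List (String × Int)) : List String :=
  match (choice_set.map Prod.snd).min? with
  | none => []   -- empty dict
  | some m => (choice_set.filter (fun p => p.2 == m)).map Prod.fst

-- ===== PRECONDITION & SPEC =====
-- The argument is a Python dict, so its keys are distinct; Pre_ states exactly
-- that and excludes no actual dict input.
def Pre_C_inaction (choice_set : List (String × Int)) : Prop :=
  (choice_set.map Prod.fst).Nodup
instance (choice_set : List (String × Int)) : Decidable (Pre_C_inaction choice_set) := by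
  unfold Pre_C_inaction; infer_instance

def pvWitness_C_inaction : (List (String × Int)) := [("x", 3), ("y", 1), ("z", 1)]

def Spec_C_inaction (choice_set : List (String × Int)) (out : List String) : Prop := out = C_inaction_alt choice_set
instance (choice_set : List (String × Int)) (out : List String) : Decidable (Spec_C_inaction choice_set out) := by unfold Spec_C_inaction; infer_instance

-- ===== CLAIM (what is proved, stated in full; the proofs are below) =====
def Claim_equal_C_inaction : Prop := ∀ (choice_set : List (String × Int)), Dom_C_inaction choice_set → Pre_C_inaction choice_set → Spec_C_inaction choice_set (C_inaction choice_set)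

-- ===== LEMMAS AND PROOFS =====

-- append-accumulator loops are maps
theorem pv_foldl_append {α β : Type} (f : α → β) :
    ∀ (l : List α) (acc : List β),
      l.foldl (fun ws x => ws ++ [f x]) acc = acc ++ l.map f := by
  intro l
  induction l with
  | nil => simp
  | cons x xs ih => intro acc; simp [List.foldl_cons, ih]

-- A's weights list, under distinct keys, is just the mapped values
theorem pv_weights_eq (cs : List (String × Int)) (S : Int)
    (hnd : (cs.map Prod.fst).Nodup) :
    cs.foldl (fun ws d => ws ++ [2 * (PySem.Dict.mk cs).getD d.1 0 - S]) []
      = cs.map (fun p => 2 * p.2 - S) := by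
  rw [pv_foldl_append]
  simp only [List.nil_append]
  apply List.map_congr_left
  intro p hp
  have h := PySem.Dict.getD_of_mem_items (d := PySem.Dict.mk cs) (k := p.1) (v := p.2)
    (by simpa using hp) (by simpa [PySem.Dict.keys] using hnd) (d0 := 0)
  rw [h]

-- invariant of A's min-scan loop
theorem pv_loop_inv (w : List Int) :
    ∀ n : Nat, 1 ≤ n →
      let st := (List.range n).foldl (pvStepA w) (0, [])
      st.1 < n ∧ (∀ j, j < n → w.getD st.1 0 ≤ w.getD j 0) ∧
        st.2 = (List.range n).filter (fun i => decide (w.getD i 0 = w.getD st.1 0)) := by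
  intro n
  induction n with
  | zero => intro h; omega
  | succ n ih =>
    intro _
    rcases Nat.eq_zero_or_pos n with hn | hn
    · subst hn
      simp [pvStepA]
    · have ⟨h1, h2, h3⟩ := ih hn
      rw [List.range_succ, List.foldl_append, List.foldl_cons, List.foldl_nil]
      set st := (List.range n).foldl (pvStepA w) (0, []) with hst
      by_cases hlt : w.getD n 0 < w.getD st.1 0
      · -- new strict minimum at index n
        have hstep : pvStepA w st n = (n, [n]) := by
          unfold pvStepA
          rw [if_pos hlt]; simp
        rw [hstep]
        refine ⟨by omega, ?_, ?_⟩
        · intro j hj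
          rcases Nat.lt_succ_iff_lt_or_eq.mp hj with hj' | hj'
          · exact le_of_lt (lt_of_lt_of_le hlt (h2 j hj'))
          · rw [hj']
        · rw [List.filter_append]
          have hnil : (List.range n).filter (fun i => decide (w.getD i 0 = w.getD (n, [n]).1 0)) = [] := by
            apply List.filter_eq_nil_iff.mpr
            intro i hi
            have := h2 i (List.mem_range.mp hi)
            simp only [decide_eq_true_eq]
            omega
          rw [hnil, List.nil_append, List.filter_cons, List.filter_nil,
            decide_eq_true (by rfl : w.getD n 0 = w.getD (n, [n]).1 0)]
          simp
      · by_cases heq : w.getD n 0 = w.getD st.1 0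
        · -- tie with the current minimum
          have hstep : pvStepA w st n = (st.1, st.2 ++ [n]) := by
            unfold pvStepA
            rw [if_neg hlt, if_pos heq]
          rw [hstep]
          refine ⟨by omega, ?_, ?_⟩
          · intro j hj
            rcases Nat.lt_succ_iff_lt_or_eq.mp hj with hj' | hj'
            · exact h2 j hj'
            · rw [hj']; exact le_of_eq heq.symm
          · rw [List.filter_append, h3, List.filter_cons, List.filter_nil,
              decide_eq_true (heq : w.getD n 0 = w.getD (st.1, st.2 ++ [n]).1 0)]
            simp
        · -- strictly larger: state unchanged
          have hstep : pvStepA w st n = st := by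
            unfold pvStepA
            rw [if_neg hlt, if_neg heq]
          rw [hstep]
          refine ⟨by omega, ?_, ?_⟩
          · intro j hj
            rcases Nat.lt_succ_iff_lt_or_eq.mp hj with hj' | hj'
            · exact h2 j hj'
            · rw [hj']; omega
          · rw [List.filter_append, h3, List.filter_cons, List.filter_nil,
              decide_eq_false (heq : ¬ w.getD n 0 = w.getD st.1 0)]
            simp

-- selecting indices then reading keys = filtering pairs then taking keys
theorem pv_idx_filter_map (m : Int) :
    ∀ cs : List (String × Int),
      ((List.range cs.length).filter
          (fun i => decide ((cs.map Prod.snd).getD i 0 = m))).map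
        (fun i => (cs.map Prod.fst).getD i "")
      = (cs.filter (fun p => p.2 == m)).map Prod.fst := by
  intro cs
  induction cs with
  | nil => simp
  | cons p cs ih =>
    by_cases hp : p.2 = m
    · simp [List.range_succ_eq_map, List.filter_map, Function.comp_def, hp,
        List.map_map] at ih ⊢
      exact ih
    · simp [List.range_succ_eq_map, List.filter_map, Function.comp_def, hp,
        List.map_map] at ih ⊢
      exact ih

-- the loop's minimal weight corresponds to the minimal value
theorem pv_min_at (vs : List Int) (p : Nat) (hp : p < vs.length)
    (hmin : ∀ j, j < vs.length → vs.getD p 0 ≤ vs.getD j 0) :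
    vs.min? = some (vs.getD p 0) := by
  rw [List.min?_eq_some_iff]
  constructor
  · simp [List.getD_eq_getElem?_getD, List.getElem?_eq_getElem hp]
  · intro b hb
    rcases List.mem_iff_getElem.mp hb with ⟨j, hj, hjb⟩
    simpa [List.getD_eq_getElem?_getD, List.getElem?_eq_getElem hj, hjb] using hmin j hj

-- ===== VERDICT (by name: the statement is the Claim_ definition above) =====
theorem C_inaction_spec : Claim_equal_C_inaction := by
  intro cs _ hpre
  simp only [Spec_C_inaction, C_inaction, C_inaction_alt]
  rcases cs with _ | ⟨q, cs'⟩
  · simp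
  · set cs := q :: cs' with hcs
    set S : Int := (cs.map Prod.snd).sum with hS
    rw [pv_weights_eq cs S hpre]
    set vs : List Int := cs.map Prod.snd with hvs
    set w : List Int := cs.map (fun p => 2 * p.2 - S) with hw
    have hlen : w.length = vs.length := by simp [hw, hvs]
    have hlen' : w.length = cs.length := by simp [hw]
    have hpos : 1 ≤ w.length := by simp [hw, hcs]
    obtain ⟨h1, h2, h3⟩ := pv_loop_inv w w.length hpos
    set st := (List.range w.length).foldl (pvStepA w) (0, []) with hst
    -- weight comparisons are value comparisons
    have hwv : ∀ i, i < w.length → w.getD i 0 = 2 * vs.getD i 0 - S := by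
      intro i hi
      rw [hw, hvs]
      rw [List.getD_eq_getElem?_getD, List.getD_eq_getElem?_getD]
      rw [List.getElem?_map, List.getElem?_map]
      rcases List.getElem?_eq_some_iff.mpr ⟨by simpa [hw] using hi, rfl⟩ with _
      have hi' : i < cs.length := by omega
      rw [List.getElem?_eq_getElem hi']
      simp
    have hminv : ∀ j, j < vs.length → vs.getD st.1 0 ≤ vs.getD j 0 := by
      intro j hj
      have := h2 j (by omega)
      rw [hwv j (by omega), hwv st.1 (by omega)] at this
      omega
    have hm : vs.min? = some (vs.getD st.1 0) :=
      pv_min_at vs st.1 (by omega) hminv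
    rw [hm]
    rw [pv_foldl_append]
    rw [List.nil_append, h3]
    have hfe : (List.range w.length).filter (fun i => decide (w.getD i 0 = w.getD st.1 0))
        = (List.range cs.length).filter (fun i => decide (vs.getD i 0 = vs.getD st.1 0)) := by
      rw [hlen']
      apply List.filter_congr
      intro i hi
      have hi' : i < w.length := by rw [hlen']; exact List.mem_range.mp hi
      rw [hwv i hi', hwv st.1 (by omega)]
      simp only [decide_eq_decide]
      omega
    rw [hfe]
    exact pv_idx_filter_map (vs.getD st.1 0) cs
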